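-- pv_equiv track=rewrite | github.com/Shilpabhavani1/Gfg | Medium/Largest subsquare surrounded by X/largest-subsquare-surrounded-by-x.py | largestSubsquare
-- ===== SOURCE A (Python) =====
-- def largestSubsquare(n, a):
--     #code here
--     r,c=len(a),len(a[0])
--     dp=[[[0,0]for _ in range(r+1)]for _ in range(c+1)]
--     for i in range(r):
--         for j in range(c):
--             if a[i][j]=="X":
--                 dp[i+1][j+1][0]=1+dp[i][j+1][0]
--                 dp[i+1][j+1][1]=1+dp[i+1][j][1]
--     mx=0
--     for i in range(r,0,-1):
--         for j in range(c,0,-1):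
--             mn=min(dp[i][j][0],dp[i][j][1])
--             while mn>mx:
--                 if dp[i-mn+1][j][1]>=mn and dp[i][j-mn+1][0]>=mn:
--                     mx=mn
--                 else:
--                     mn=mn-1
--     return mx
-- ===== SOURCE B (Python) =====
-- def largestSubsquare(n, a):
--     # size-first search: try each square size k from largest to smallest and
--     # return the first k for which some k x k square has an all-'X' border.
--     r, c = len(a), len(a[0])
--     for k in range(min(r, c), 0, -1):
--         for i in range(r - k + 1):
--             for j in range(c - k + 1):
--                 if (all(a[i][j + t] == "X" for t in range(k))
--                         and all(a[i + k - 1][j + t] == "X" for t in range(k))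
--                         and all(a[i + t][j] == "X" for t in range(k))
--                         and all(a[i + t][j + k - 1] == "X" for t in range(k))):
--                     return k
--     return 0
-- ===== Notes on version B (the rewrite author's own statement) =====
-- stated objective: alternative
-- what changed: Replaces the run-length DP table plus per-cell while-loop shrink with a size-first search: for each candidate size k from min(r,c) down to 1, scan all top-left corners and check the four border segments directly, returning the first (largest) k found.
import Mathlib
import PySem

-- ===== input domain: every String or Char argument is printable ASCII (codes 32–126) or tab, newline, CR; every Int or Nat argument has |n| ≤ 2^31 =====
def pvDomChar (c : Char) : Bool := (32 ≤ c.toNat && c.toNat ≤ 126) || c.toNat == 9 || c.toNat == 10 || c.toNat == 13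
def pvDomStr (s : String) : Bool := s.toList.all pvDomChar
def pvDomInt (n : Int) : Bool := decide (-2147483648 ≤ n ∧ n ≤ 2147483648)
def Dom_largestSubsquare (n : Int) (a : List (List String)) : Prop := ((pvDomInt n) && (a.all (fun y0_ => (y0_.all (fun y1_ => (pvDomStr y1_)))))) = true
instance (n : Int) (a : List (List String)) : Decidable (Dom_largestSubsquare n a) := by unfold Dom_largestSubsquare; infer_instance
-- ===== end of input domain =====

-- B replaces A's run-length DP table + per-cell shrinking while-loop by a size-first
-- search (largest candidate size first, direct border scans); equivalence is proved on
-- non-empty square grids (exactly where A returns instead of raising IndexError).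

-- ===== PORT A =====
-- dp[i][j] access/update (Python list-of-lists indexing; pyGetD/pySetD are exact for the
-- in-range indices that occur under Pre_)
def pvDpGet (dp : List (List (Int × Int))) (i j : Int) : Int × Int :=
  PySem.List.pyGetD (PySem.List.pyGetD dp i []) j (0, 0)

def pvDpSet (dp : List (List (Int × Int))) (i j : Int) (v : Int × Int) : List (List (Int × Int)) :=
  PySem.List.pySetD dp i (PySem.List.pySetD (PySem.List.pyGetD dp i []) j v)

def pvAGet (a : List (List String)) (i j : Int) : String :=
  PySem.List.pyGetD (PySem.List.pyGetD a i []) j ""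

-- the 'while mn>mx' loop of A: returns the new mx
def pvWhile (dp : List (List (Int × Int))) (i j : Int) (mn mx : Int) : Int :=
  if _h : mx < mn then
    if (pvDpGet dp (i - mn + 1) j).2 ≥ mn ∧ (pvDpGet dp i (j - mn + 1)).1 ≥ mn then mn
    else pvWhile dp i j (mn - 1) mx
  else mx
termination_by (mn - mx).toNat
decreasing_by omega

def largestSubsquare (n : Int) (a : List (List String)) : Int :=
  let r : Int := a.length
  let c : Int := (PySem.List.pyGetD a 0 []).length   -- len(a[0]); exact under Pre_ (a ≠ [])
  let dp0 : List (List (Int × Int)) :=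
    List.replicate (c + 1).toNat (List.replicate (r + 1).toNat ((0 : Int), (0 : Int)))
  let dp := (PySem.List.pyRange 0 r 1).foldl (fun dp i =>
      (PySem.List.pyRange 0 c 1).foldl (fun dp j =>
        if pvAGet a i j = "X" then
          pvDpSet dp (i + 1) (j + 1) (1 + (pvDpGet dp i (j + 1)).1, 1 + (pvDpGet dp (i + 1) j).2)
        else dp) dp) dp0
  (PySem.List.pyRange r 0 (-1)).foldl (fun mx i =>
    (PySem.List.pyRange c 0 (-1)).foldl (fun mx j =>
      pvWhile dp i j (min (pvDpGet dp i j).1 (pvDpGet dp i j).2) mx) mx) 0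

-- ===== PORT B =====
def pvCellB (a : List (List String)) (i j : Nat) : String := (a.getD i []).getD j ""

-- the four all(...) border checks of Source B for a k×k square with top-left (i,j)
def pvBorder (a : List (List String)) (i j k : Nat) : Bool :=
  ((List.range k).all fun t => pvCellB a i (j + t) == "X") &&
  ((List.range k).all fun t => pvCellB a (i + k - 1) (j + t) == "X") &&
  ((List.range k).all fun t => pvCellB a (i + t) j == "X") &&
  ((List.range k).all fun t => pvCellB a (i + t) (j + k - 1) == "X")

def pvScan (a : List (List String)) (r c k : Nat) : Bool :=
  (List.range (r - k + 1)).any fun i => (List.range (c - k + 1)).any fun j => pvBorder a i j k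

-- 'for k in range(min(r,c), 0, -1): … return k' with early return
def pvDescend (a : List (List String)) (r c : Nat) : Nat → Int
  | 0 => 0
  | Nat.succ k => if pvScan a r c (k + 1) then ((k : Int) + 1) else pvDescend a r c k

def largestSubsquare_alt (n : Int) (a : List (List String)) : Int :=
  let r := a.length
  let c := (a.headD []).length
  pvDescend a r c (min r c)

-- ===== PRECONDITION & SPEC =====
-- Pre_ = exactly the inputs where Python A returns: a non-empty grid that either has an
-- empty first row (all loops are empty, A returns 0) or is square (len(a) == len(a[0]))
-- with every row at least len(a[0]) long; anywhere else A raises IndexError.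
def Pre_largestSubsquare (n : Int) (a : List (List String)) : Prop :=
  a ≠ [] ∧ ((a.headD []).length = 0 ∨
    (a.length = (a.headD []).length ∧ ∀ row ∈ a, (a.headD []).length ≤ row.length))

instance (n : Int) (a : List (List String)) : Decidable (Pre_largestSubsquare n a) := by
  unfold Pre_largestSubsquare; infer_instance

def pvWitness_largestSubsquare : Int × List (List String) := (2, [["X", "X"], ["X", "X"]])

def Spec_largestSubsquare (n : Int) (a : List (List String)) (out : Int) : Prop := out = largestSubsquare_alt n a
instance (n : Int) (a : List (List String)) (out : Int) : Decidable (Spec_largestSubsquare n a out) := by unfold Spec_largestSubsquare; infer_instance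

-- ===== CLAIM (what is proved, stated in full; the proofs are below) =====
def Claim_equal_largestSubsquare : Prop := ∀ (n : Int) (a : List (List String)), Dom_largestSubsquare n a → Pre_largestSubsquare n a → Spec_largestSubsquare n a (largestSubsquare n a)

-- ===== LEMMAS AND PROOFS =====

-- spec-level run lengths: upF a i j / leF a i j = value of dp[i][j][0] / dp[i][j][1] (1-indexed)
def upF (a : List (List String)) : Nat → Nat → Nat
  | 0, _ => 0
  | _ + 1, 0 => 0
  | i + 1, j + 1 => if pvCellB a i j == "X" then upF a i (j + 1) + 1 else 0

def leF (a : List (List String)) : Nat → Nat → Nat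
  | 0, _ => 0
  | _ + 1, 0 => 0
  | i + 1, j + 1 => if pvCellB a i j == "X" then leF a (i + 1) j + 1 else 0

def Tb (a : List (List String)) (i j : Nat) : Int × Int := ((upF a i j : Int), (leF a i j : Int))

-- state of dp after processing all rows < i fully plus cells (i, j') for j' < t of row i
def StateOK (a : List (List String)) (N i t : Nat) (dp : List (List (Int × Int))) : Prop :=
  dp.length = N + 1 ∧ (∀ row ∈ dp, row.length = N + 1) ∧
  ∀ i' j', i' ≤ N → j' ≤ N →
    (dp.getD i' []).getD j' (0, 0) =
      (if i' ≤ i ∨ (i' = i + 1 ∧ j' ≤ t) then Tb a i' j' else (0, 0))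

theorem getD_set2d (dp : List (List (Int × Int))) (i j i' j' : Nat) (v : Int × Int)
    (hi : i < dp.length) (hj : j < (dp.getD i []).length) :
    ((dp.set i ((dp.getD i []).set j v)).getD i' []).getD j' (0, 0) =
      if i' = i ∧ j' = j then v else (dp.getD i' []).getD j' (0, 0) := by
  have hgd : dp.getD i [] = dp[i] := by
    simp [List.getD_eq_getElem?_getD, List.getElem?_eq_getElem hi]
  simp only [List.getD_eq_getElem?_getD]
  by_cases hii : i' = i
  · subst hii
    rw [List.getElem?_set_self']
    simp only [List.getElem?_eq_getElem hi, Option.getD_some, true_and]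
    rw [hgd] at hj
    by_cases hjj : j' = j
    · subst hjj
      simp [hj]
    · simp [hjj, Ne.symm hjj]
  · rw [List.getElem?_set_ne (fun h => hii h.symm)]
    simp [hii]

theorem Tb_row0 (a : List (List String)) (j : Nat) : Tb a 0 j = (0, 0) := by
  cases j <;> simp [Tb, upF, leF]

theorem Tb_col0 (a : List (List String)) (i : Nat) : Tb a i 0 = (0, 0) := by
  cases i <;> simp [Tb, upF, leF]

theorem step_cell (a : List (List String)) (N i j : Nat) (hi : i < N) (hj : j < N)
    (dp : List (List (Int × Int))) (h : StateOK a N i j dp) :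
    StateOK a N i (j + 1)
      (if pvAGet a (i : Int) (j : Int) = "X" then
        pvDpSet dp ((i : Int) + 1) ((j : Int) + 1)
          (1 + (pvDpGet dp (i : Int) ((j : Int) + 1)).1, 1 + (pvDpGet dp ((i : Int) + 1) (j : Int)).2)
      else dp) := by
  obtain ⟨hlen, hrows, hval⟩ := h
  have hrowlen : ∀ k : Nat, k ≤ N → (dp.getD k []).length = N + 1 := by
    intro k hk
    have hk' : k < dp.length := by omega
    have : dp.getD k [] = dp[k] := by
      simp [List.getD_eq_getElem?_getD, List.getElem?_eq_getElem hk']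
    rw [this]; exact hrows _ (List.getElem_mem hk')
  have hcast1 : ((i : Int) + 1) = ((i + 1 : Nat) : Int) := by push_cast; ring
  have hcast2 : ((j : Int) + 1) = ((j + 1 : Nat) : Int) := by push_cast; ring
  have hAget : pvAGet a (i : Int) (j : Int) = pvCellB a i j := by
    simp [pvAGet, pvCellB, PySem.List.pyGetD_natCast]
  have hget : ∀ (p q : Int) (pn qn : Nat), p = (pn : Int) → q = (qn : Int) →
      pvDpGet dp p q = (dp.getD pn []).getD qn (0, 0) := by
    rintro p q pn qn rfl rfl
    simp [pvDpGet, PySem.List.pyGetD_natCast]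
  have hr1 : pvDpGet dp (i : Int) ((j : Int) + 1) = Tb a i (j + 1) := by
    rw [hget _ _ i (j + 1) rfl hcast2, hval i (j + 1) (by omega) (by omega), if_pos (by omega)]
  have hr2 : pvDpGet dp ((i : Int) + 1) (j : Int) = Tb a (i + 1) j := by
    rw [hget _ _ (i + 1) j hcast1 rfl]
    rcases Nat.eq_zero_or_pos j with rfl | hjpos
    · rw [hval (i + 1) 0 (by omega) (by omega)]
      split
      · rfl
      · exact (Tb_col0 a (i + 1)).symm
    · rw [hval (i + 1) j (by omega) (by omega), if_pos (by omega)]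
  by_cases hX : pvCellB a i j == "X"
  · rw [hAget, if_pos (by simpa using hX)]
    have hset : pvDpSet dp ((i : Int) + 1) ((j : Int) + 1)
          (1 + (pvDpGet dp (i : Int) ((j : Int) + 1)).1, 1 + (pvDpGet dp ((i : Int) + 1) (j : Int)).2)
        = dp.set (i + 1) ((dp.getD (i + 1) []).set (j + 1)
            (1 + (pvDpGet dp (i : Int) ((j : Int) + 1)).1, 1 + (pvDpGet dp ((i : Int) + 1) (j : Int)).2)) := by
      rw [hcast1, hcast2]
      simp only [pvDpSet, PySem.List.pySetD_natCast, PySem.List.pyGetD_natCast]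
    rw [hset]
    have hTb : (1 + (pvDpGet dp (i : Int) ((j : Int) + 1)).1,
                1 + (pvDpGet dp ((i : Int) + 1) (j : Int)).2) = Tb a (i + 1) (j + 1) := by
      rw [hr1, hr2]
      show ((1 + (upF a i (j + 1) : Int)), (1 + (leF a (i + 1) j : Int))) = _
      rw [Tb]
      rw [show upF a (i + 1) (j + 1) = upF a i (j + 1) + 1 by rw [upF, if_pos hX]]
      rw [show leF a (i + 1) (j + 1) = leF a (i + 1) j + 1 by rw [leF, if_pos hX]]
      simp only [Prod.mk.injEq]
      push_cast
      constructor <;> ring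
    refine ⟨by simp [hlen], ?_, ?_⟩
    · intro row hrow
      rcases List.mem_or_eq_of_mem_set hrow with h | rfl
      · exact hrows _ h
      · rw [List.length_set]; exact hrowlen (i + 1) (by omega)
    · intro i' j' hi' hj'
      rw [getD_set2d dp (i + 1) (j + 1) i' j' _ (by omega) (by rw [hrowlen (i + 1) (by omega)]; omega)]
      rw [hTb]
      by_cases hc : i' = i + 1 ∧ j' = j + 1
      · rw [if_pos hc, if_pos (by omega)]
        rw [hc.1, hc.2]
      · rw [if_neg hc, hval i' j' hi' hj']
        by_cases hold : i' ≤ i ∨ (i' = i + 1 ∧ j' ≤ j)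
        · rw [if_pos hold, if_pos (by omega)]
        · rw [if_neg hold, if_neg (by omega)]
  · rw [hAget, if_neg (by simpa using hX)]
    refine ⟨hlen, hrows, ?_⟩
    intro i' j' hi' hj'
    rw [hval i' j' hi' hj']
    by_cases hold : i' ≤ i ∨ (i' = i + 1 ∧ j' ≤ j)
    · rw [if_pos hold, if_pos (by omega)]
    · rw [if_neg hold]
      by_cases hnew : i' ≤ i ∨ (i' = i + 1 ∧ j' ≤ j + 1)
      · rw [if_pos hnew]
        have : i' = i + 1 ∧ j' = j + 1 := by omega
        rw [this.1, this.2, Tb]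
        rw [show upF a (i + 1) (j + 1) = 0 by rw [upF, if_neg hX]]
        rw [show leF a (i + 1) (j + 1) = 0 by rw [leF, if_neg hX]]
        rfl
      · rw [if_neg hnew]

theorem stateOK_shift (a : List (List String)) (N i : Nat) (dp : List (List (Int × Int)))
    (h : StateOK a N i N dp) : StateOK a N (i + 1) 0 dp := by
  obtain ⟨h1, h2, h3⟩ := h
  refine ⟨h1, h2, ?_⟩
  intro i' j' hi' hj'
  rw [h3 i' j' hi' hj']
  by_cases hold : i' ≤ i ∨ (i' = i + 1 ∧ j' ≤ N)
  · rw [if_pos hold, if_pos (by omega)]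
  · rw [if_neg hold]
    by_cases hnew : i' ≤ i + 1 ∨ (i' = i + 1 + 1 ∧ j' ≤ 0)
    · rw [if_pos hnew]
      have : i' = i + 2 ∧ j' = 0 := by omega
      rw [this.1, this.2]
      exact (Tb_col0 a (i + 2)).symm
    · rw [if_neg hnew]

theorem row_fold (a : List (List String)) (N i : Nat) (hi : i < N)
    (dp : List (List (Int × Int))) (h : StateOK a N i 0 dp) :
    StateOK a N (i + 1) 0
      ((PySem.List.pyRange 0 (N : Int) 1).foldl (fun dp j =>
        if pvAGet a (i : Int) j = "X" then
          pvDpSet dp ((i : Int) + 1) (j + 1)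
            (1 + (pvDpGet dp (i : Int) (j + 1)).1, 1 + (pvDpGet dp ((i : Int) + 1) j).2)
        else dp) dp) := by
  rw [PySem.List.pyRange_zero_natCast, List.foldl_map]
  have aux : ∀ t, t ≤ N → StateOK a N i t
      ((List.range t).foldl (fun dp (j : Nat) =>
        if pvAGet a (i : Int) (j : Int) = "X" then
          pvDpSet dp ((i : Int) + 1) ((j : Int) + 1)
            (1 + (pvDpGet dp (i : Int) ((j : Int) + 1)).1, 1 + (pvDpGet dp ((i : Int) + 1) (j : Int)).2)
        else dp) dp) := by
    intro t
    induction t with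
    | zero => intro _; simpa using h
    | succ t ih =>
      intro ht
      rw [List.range_succ, List.foldl_append, List.foldl_cons, List.foldl_nil]
      exact step_cell a N i t hi (by omega) _ (ih (by omega))
  exact stateOK_shift a N i _ (aux N le_rfl)

theorem replicate_getD (N i' j' : Nat) :
    (((List.replicate (N + 1) (List.replicate (N + 1) ((0 : Int), (0 : Int)))).getD i' []).getD j' (0, 0)) = (0, 0) := by
  simp only [List.getD_eq_getElem?_getD, List.getElem?_replicate]
  split_ifs <;> simp

theorem table_fold (a : List (List String)) (N : Nat) :
    ∀ i' j', i' ≤ N → j' ≤ N →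
      ((((PySem.List.pyRange 0 (N : Int) 1).foldl (fun dp i =>
          (PySem.List.pyRange 0 (N : Int) 1).foldl (fun dp j =>
            if pvAGet a i j = "X" then
              pvDpSet dp (i + 1) (j + 1)
                (1 + (pvDpGet dp i (j + 1)).1, 1 + (pvDpGet dp (i + 1) j).2)
            else dp) dp)
          (List.replicate (N + 1) (List.replicate (N + 1) ((0 : Int), (0 : Int))))).getD i' []).getD j' (0, 0))
        = Tb a i' j' := by
  rw [PySem.List.pyRange_zero_natCast, List.foldl_map]
  have aux : ∀ t, t ≤ N → StateOK a N t 0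
      ((List.range t).foldl (fun dp (i : Nat) =>
          ((List.range N).map (Nat.cast : Nat → Int)).foldl (fun dp j =>
            if pvAGet a (i : Int) j = "X" then
              pvDpSet dp ((i : Int) + 1) (j + 1)
                (1 + (pvDpGet dp (i : Int) (j + 1)).1, 1 + (pvDpGet dp ((i : Int) + 1) j).2)
            else dp) dp)
        (List.replicate (N + 1) (List.replicate (N + 1) ((0 : Int), (0 : Int))))) := by
    intro t
    induction t with
    | zero =>
      intro _
      refine ⟨by simp, by intro row hrow; simp_all [List.eq_of_mem_replicate hrow], ?_⟩
      intro i' j' hi' hj'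
      rw [List.range_zero, List.foldl_nil, replicate_getD]
      split
      · next hc =>
        rcases hc with hc | hc
        · have : i' = 0 := by omega
          rw [this]; exact (Tb_row0 a j').symm
        · rw [hc.1]
          have : j' = 0 := by omega
          rw [this]; exact (Tb_col0 a 1).symm
      · rfl
    | succ t ih =>
      intro ht
      rw [List.range_succ, List.foldl_append, List.foldl_cons, List.foldl_nil]
      have hr := row_fold a N t (by omega) _ (ih (by omega))
      rwa [PySem.List.pyRange_zero_natCast] at hr
  intro i' j' hi' hj'
  obtain ⟨-, -, h3⟩ := aux N le_rfl
  rw [h3 i' j' hi' hj', if_pos (by omega)]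

theorem upF_bound (a : List (List String)) : ∀ i j, upF a i j ≤ i := by
  intro i
  induction i with
  | zero => intro j; cases j <;> simp [upF]
  | succ i ih =>
    intro j
    cases j with
    | zero => simp [upF]
    | succ j => rw [upF]; split <;> [exact Nat.succ_le_succ (ih (j+1)); omega]

theorem leF_bound (a : List (List String)) : ∀ i j, leF a i j ≤ j := by
  intro i j
  induction j generalizing i with
  | zero => cases i <;> simp [leF]
  | succ j ih =>
    cases i with
    | zero => simp [leF]
    | succ i => rw [leF]; split <;> [exact Nat.succ_le_succ (ih (i+1)); omega]

theorem upF_le (a : List (List String)) (m : Nat) : ∀ i j, 1 ≤ m →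
    ((m ≤ upF a i j) ↔ (m ≤ i ∧ 1 ≤ j ∧ ∀ t < m, pvCellB a (i - 1 - t) (j - 1) == "X")) := by
  induction m with
  | zero => omega
  | succ m ih =>
    intro i j _
    match i, j with
    | 0, j => simp [upF]
    | i + 1, 0 => simp [upF]
    | i + 1, j + 1 =>
      rw [upF]
      by_cases hc : pvCellB a i j == "X"
      · rw [if_pos hc]
        by_cases hm : m = 0
        · subst hm
          constructor
          · intro _
            exact ⟨by omega, by omega, by intro t ht; interval_cases t; simpa using hc⟩
          · intro _; omega
        · have ihi := ih i (j + 1) (by omega)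
          constructor
          · intro h
            have h' : m ≤ upF a i (j + 1) := by omega
            rcases ihi.mp h' with ⟨h1, _, h3⟩
            refine ⟨by omega, by omega, ?_⟩
            intro t ht
            rcases Nat.eq_zero_or_pos t with rfl | hgt
            · simpa using hc
            · have := h3 (t - 1) (by omega)
              have he : i - 1 - (t - 1) = i + 1 - 1 - t := by omega
              rw [he] at this
              simpa using this
          · rintro ⟨h1, _, h3⟩
            have h' : m ≤ upF a i (j + 1) := by
              refine ihi.mpr ⟨by omega, by omega, ?_⟩
              intro t ht
              have := h3 (t + 1) (by omega)
              have he : i + 1 - 1 - (t + 1) = i - 1 - t := by omega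
              rw [he] at this
              simpa using this
            omega
      · rw [if_neg hc]
        simp only [Nat.le_zero, Nat.add_eq_zero_iff]
        constructor
        · omega
        · rintro ⟨h1, _, h3⟩
          exfalso
          exact hc (by simpa using h3 0 (by omega))

theorem leF_le (a : List (List String)) (m : Nat) : ∀ i j, 1 ≤ m →
    ((m ≤ leF a i j) ↔ (m ≤ j ∧ 1 ≤ i ∧ ∀ t < m, pvCellB a (i - 1) (j - 1 - t) == "X")) := by
  induction m with
  | zero => omega
  | succ m ih =>
    intro i j _
    match i, j with
    | 0, j => simp [leF]
    | i + 1, 0 => simp [leF]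
    | i + 1, j + 1 =>
      rw [leF]
      by_cases hc : pvCellB a i j == "X"
      · rw [if_pos hc]
        by_cases hm : m = 0
        · subst hm
          constructor
          · intro _
            exact ⟨by omega, by omega, by intro t ht; interval_cases t; simpa using hc⟩
          · intro _; omega
        · have ihi := ih (i + 1) j (by omega)
          constructor
          · intro h
            have h' : m ≤ leF a (i + 1) j := by omega
            rcases ihi.mp h' with ⟨h1, _, h3⟩
            refine ⟨by omega, by omega, ?_⟩
            intro t ht
            rcases Nat.eq_zero_or_pos t with rfl | hgt
            · simpa using hc
            · have := h3 (t - 1) (by omega)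
              have he : j - 1 - (t - 1) = j + 1 - 1 - t := by omega
              rw [he] at this
              simpa using this
          · rintro ⟨h1, _, h3⟩
            have h' : m ≤ leF a (i + 1) j := by
              refine ihi.mpr ⟨by omega, by omega, ?_⟩
              intro t ht
              have := h3 (t + 1) (by omega)
              have he : j + 1 - 1 - (t + 1) = j - 1 - t := by omega
              rw [he] at this
              simpa using this
            omega
      · rw [if_neg hc]
        simp only [Nat.le_zero, Nat.add_eq_zero_iff]
        constructor
        · omega
        · rintro ⟨h1, _, h3⟩
          exfalso
          exact hc (by simpa using h3 0 (by omega))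

theorem cond_iff (a : List (List String)) (i j m : Nat) (hm : 1 ≤ m) :
    (m ≤ upF a i j ∧ m ≤ leF a i j ∧ m ≤ leF a (i - m + 1) j ∧ m ≤ upF a i (j - m + 1))
      ↔ (m ≤ i ∧ m ≤ j ∧ pvBorder a (i - m) (j - m) m = true) := by
  simp only [pvBorder, Bool.and_eq_true, List.all_eq_true, List.mem_range]
  constructor
  · rintro ⟨h1, h2, h3, h4⟩
    rcases (upF_le a m i j hm).mp h1 with ⟨hi, hj1, hA1⟩
    rcases (leF_le a m i j hm).mp h2 with ⟨hj, hi1, hA2⟩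
    rcases (leF_le a m (i - m + 1) j hm).mp h3 with ⟨-, -, hA3⟩
    rcases (upF_le a m i (j - m + 1) hm).mp h4 with ⟨-, -, hA4⟩
    refine ⟨hi, hj, ⟨⟨?_, ?_⟩, ?_⟩, ?_⟩
    · intro t ht
      have h := hA3 (m - 1 - t) (by omega)
      have e1 : i - m + 1 - 1 = i - m := by omega
      have e2 : j - 1 - (m - 1 - t) = j - m + t := by omega
      rwa [e1, e2] at h
    · intro t ht
      have h := hA2 (m - 1 - t) (by omega)
      have e1 : i - m + m - 1 = i - 1 := by omega
      have e2 : j - 1 - (m - 1 - t) = j - m + t := by omega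
      rw [e2] at h; rwa [e1]
    · intro t ht
      have h := hA4 (m - 1 - t) (by omega)
      have e1 : i - 1 - (m - 1 - t) = i - m + t := by omega
      have e2 : j - m + 1 - 1 = j - m := by omega
      rwa [e1, e2] at h
    · intro t ht
      have h := hA1 (m - 1 - t) (by omega)
      have e1 : i - 1 - (m - 1 - t) = i - m + t := by omega
      have e2 : j - m + m - 1 = j - 1 := by omega
      rw [e1] at h; rwa [e2]
  · rintro ⟨hi, hj, ⟨⟨hB1, hB2⟩, hB3⟩, hB4⟩
    refine ⟨?_, ?_, ?_, ?_⟩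
    · refine (upF_le a m i j hm).mpr ⟨hi, by omega, ?_⟩
      intro t ht
      have h := hB4 (m - 1 - t) (by omega)
      have e1 : i - m + (m - 1 - t) = i - 1 - t := by omega
      have e2 : j - m + m - 1 = j - 1 := by omega
      rwa [e1, e2] at h
    · refine (leF_le a m i j hm).mpr ⟨hj, by omega, ?_⟩
      intro t ht
      have h := hB2 (m - 1 - t) (by omega)
      have e1 : i - m + m - 1 = i - 1 := by omega
      have e2 : j - m + (m - 1 - t) = j - 1 - t := by omega
      rwa [e1, e2] at h
    · refine (leF_le a m (i - m + 1) j hm).mpr ⟨hj, by omega, ?_⟩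
      intro t ht
      have h := hB1 (m - 1 - t) (by omega)
      have e1 : i - m + 1 - 1 = i - m := by omega
      have e2 : j - m + (m - 1 - t) = j - 1 - t := by omega
      rw [e2] at h; rw [e1]; exact h
    · refine (upF_le a m i (j - m + 1) hm).mpr ⟨hi, by omega, ?_⟩
      intro t ht
      have h := hB3 (m - 1 - t) (by omega)
      have e1 : i - m + (m - 1 - t) = i - 1 - t := by omega
      have e2 : j - m + 1 - 1 = j - m := by omega
      rw [e1] at h; rw [e2]; exact h

theorem scan_iff (a : List (List String)) (N m : Nat) (hm : 1 ≤ m) (hmN : m ≤ N) :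
    (pvScan a N N m = true ↔ ∃ i j, i + m ≤ N ∧ j + m ≤ N ∧ pvBorder a i j m = true) := by
  simp only [pvScan, List.any_eq_true, List.mem_range]
  constructor
  · rintro ⟨i, hi, j, hj, hb⟩
    exact ⟨i, j, by omega, by omega, hb⟩
  · rintro ⟨i, j, hi, hj, hb⟩
    exact ⟨i, by omega, j, by omega, hb⟩

theorem pvWhile_lower (dp : List (List (Int × Int))) (i j mn mx : Int) :
    mx ≤ pvWhile dp i j mn mx := by
  fun_induction pvWhile dp i j mn mx with
  | case1 mn h hc => omega
  | case2 mn h hc ih => exact ih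
  | case3 mn h => exact le_refl _

theorem pvWhile_sound (dp : List (List (Int × Int))) (i j mn mx : Int) :
    pvWhile dp i j mn mx = mx ∨
      (mx < pvWhile dp i j mn mx ∧ pvWhile dp i j mn mx ≤ mn ∧
        (pvDpGet dp (i - pvWhile dp i j mn mx + 1) j).2 ≥ pvWhile dp i j mn mx ∧
        (pvDpGet dp i (j - pvWhile dp i j mn mx + 1)).1 ≥ pvWhile dp i j mn mx) := by
  fun_induction pvWhile dp i j mn mx with
  | case1 mn h hc => exact Or.inr ⟨h, le_refl _, hc.1, hc.2⟩
  | case2 mn h hc ih =>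
    rcases ih with h1 | ⟨h1, h2, h3⟩
    · exact Or.inl h1
    · exact Or.inr ⟨h1, by omega, h3⟩
  | case3 mn h => exact Or.inl rfl

theorem pvWhile_complete (dp : List (List (Int × Int))) (i j mn mx m : Int)
    (h1 : m ≤ mn)
    (h2 : (pvDpGet dp (i - m + 1) j).2 ≥ m ∧ (pvDpGet dp i (j - m + 1)).1 ≥ m) :
    m ≤ pvWhile dp i j mn mx := by
  fun_induction pvWhile dp i j mn mx generalizing m with
  | case1 mn h hc => omega
  | case2 mn h hc ih =>
    by_cases hm : m = mn
    · subst hm; exact absurd h2 hc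
    · exact ih m (by omega) h2
  | case3 mn h => omega

theorem descend_sound (a : List (List String)) (r c : Nat) (k : Nat) :
    pvDescend a r c k = 0 ∨
      (1 ≤ pvDescend a r c k ∧ pvDescend a r c k ≤ (k : Int) ∧
        pvScan a r c (pvDescend a r c k).toNat = true) := by
  induction k with
  | zero => left; rfl
  | succ k ih =>
    rw [pvDescend]
    split
    · next hs =>
      right
      refine ⟨by omega, by push_cast; omega, ?_⟩
      simpa using hs
    · rcases ih with h | ⟨h1, h2, h3⟩
      · exact Or.inl h
      · exact Or.inr ⟨h1, by push_cast; omega, h3⟩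

theorem descend_complete (a : List (List String)) (r c : Nat) (k m : Nat)
    (h1 : 1 ≤ m) (h2 : m ≤ k) (h3 : pvScan a r c m = true) :
    (m : Int) ≤ pvDescend a r c k := by
  induction k with
  | zero => omega
  | succ k ih =>
    rw [pvDescend]
    split
    · next hs => omega
    · next hs =>
      have hmk : m ≤ k := by
        rcases Nat.lt_or_ge m (k+1) with h | h
        · omega
        · exfalso; have : m = k + 1 := by omega
          subst this; exact hs h3
      exact ih hmk

-- generic fold lemmas for a monotone step with a soundness predicate
theorem foldl_mono_sound {α : Type} (l : List α) (s : Int → α → Int) (Q : Int → Prop)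
    (hs : ∀ mx x, x ∈ l → mx ≤ s mx x ∧ (s mx x = mx ∨ Q (s mx x))) :
    ∀ mx, mx ≤ l.foldl s mx ∧ (l.foldl s mx = mx ∨ Q (l.foldl s mx)) := by
  induction l with
  | nil => intro mx; simp
  | cons x t ih =>
    intro mx
    have hx := hs mx x (by simp)
    have ht := (fun mx' => ih (fun mx'' x' hx' => hs mx'' x' (List.mem_cons_of_mem _ hx')) mx')
    rcases ht (s mx x) with ⟨h1, h2⟩
    refine ⟨le_trans hx.1 h1, ?_⟩
    rcases h2 with h2 | h2
    · rw [List.foldl_cons, h2]; exact hx.2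
    · exact Or.inr (by simpa using h2)

theorem foldl_hit {α : Type} (l : List α) (s : Int → α → Int) (m : Int) (x : α)
    (hx : x ∈ l) (hhit : ∀ mx, m ≤ s mx x) (hmono : ∀ mx x', x' ∈ l → mx ≤ s mx x') :
    ∀ mx, m ≤ l.foldl s mx := by
  induction l with
  | nil => cases hx
  | cons y t ih =>
    intro mx
    have tmono : ∀ mx', mx' ≤ t.foldl s mx' := by
      intro mx'
      exact (foldl_mono_sound t s (fun _ => True)
        (fun mx'' x' hx' => ⟨hmono mx'' x' (List.mem_cons_of_mem _ hx'), Or.inr trivial⟩) mx').1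
    rcases List.mem_cons.mp hx with rfl | hx'
    · rw [List.foldl_cons]
      exact le_trans (hhit mx) (tmono (s mx x))
    · rw [List.foldl_cons]
      exact ih hx' (fun mx' x' h => hmono mx' x' (List.mem_cons_of_mem _ h)) (s mx y)

-- the whole phase 2 of A, over an abstract dp known to hold the run-length table,
-- equals B's descending search
theorem phase2_eq (a : List (List String)) (M : Nat) (hM : 1 ≤ M)
    (dp : List (List (Int × Int)))
    (htab : ∀ i' j', i' ≤ M → j' ≤ M → (dp.getD i' []).getD j' (0, 0) = Tb a i' j') :
    ((PySem.List.pyRange (M : Int) 0 (-1)).foldl (fun mx i =>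
      (PySem.List.pyRange (M : Int) 0 (-1)).foldl (fun mx j =>
        pvWhile dp i j (min (pvDpGet dp i j).1 (pvDpGet dp i j).2) mx) mx) 0)
    = pvDescend a M M M := by
  have hgetI : ∀ (p q : Int) (pn qn : Nat), p = (pn : Int) → q = (qn : Int) →
      pn ≤ M → qn ≤ M → pvDpGet dp p q = Tb a pn qn := by
    rintro p q pn qn rfl rfl h1 h2
    rw [pvDpGet]
    simp only [PySem.List.pyGetD_natCast]
    exact htab pn qn h1 h2
  -- the per-cell while-loop step, for 1 ≤ i, j ≤ M
  set SA : Int := (PySem.List.pyRange (M : Int) 0 (-1)).foldl (fun mx i =>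
      (PySem.List.pyRange (M : Int) 0 (-1)).foldl (fun mx j =>
        pvWhile dp i j (min (pvDpGet dp i j).1 (pvDpGet dp i j).2) mx) mx) 0 with hSA
  -- soundness side
  have hQ : ∀ (i j mx : Int), 0 < i → i ≤ (M : Int) → 0 < j → j ≤ (M : Int) →
      (mx ≤ pvWhile dp i j (min (pvDpGet dp i j).1 (pvDpGet dp i j).2) mx ∧
        (pvWhile dp i j (min (pvDpGet dp i j).1 (pvDpGet dp i j).2) mx = mx ∨
          (pvWhile dp i j (min (pvDpGet dp i j).1 (pvDpGet dp i j).2) mx ≤ (M : Int) ∧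
            (1 ≤ pvWhile dp i j (min (pvDpGet dp i j).1 (pvDpGet dp i j).2) mx →
              pvScan a M M (pvWhile dp i j (min (pvDpGet dp i j).1 (pvDpGet dp i j).2) mx).toNat = true)))) := by
    intro i j mx hi0 hiM hj0 hjM
    refine ⟨pvWhile_lower dp i j _ mx, ?_⟩
    rcases pvWhile_sound dp i j (min (pvDpGet dp i j).1 (pvDpGet dp i j).2) mx with h | ⟨hgt, hle, hc2, hc1⟩
    · exact Or.inl h
    · right
      set res := pvWhile dp i j (min (pvDpGet dp i j).1 (pvDpGet dp i j).2) mx with hres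
      have hiN : i = ((i.toNat : Nat) : Int) := by omega
      have hjN : j = ((j.toNat : Nat) : Int) := by omega
      set iN := i.toNat
      set jN := j.toNat
      have hij : pvDpGet dp i j = Tb a iN jN := hgetI i j iN jN hiN hjN (by omega) (by omega)
      have hup : res ≤ (upF a iN jN : Int) := by
        rw [hij] at hle; simp only [Tb] at hle; omega
      have hlef : res ≤ (leF a iN jN : Int) := by
        rw [hij] at hle; simp only [Tb] at hle; omega
      have hub := upF_bound a iN jN
      have hlb := leF_bound a iN jN
      have hresM : res ≤ (M : Int) := by omega
      refine ⟨hresM, ?_⟩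
      intro hres1
      set m := res.toNat with hm
      have hm1 : 1 ≤ m := by omega
      have hmi : m ≤ iN := by omega
      have hmj : m ≤ jN := by omega
      -- convert the two checked conditions
      have e1 : i - res + 1 = ((iN - m + 1 : Nat) : Int) := by omega
      have e2 : j - res + 1 = ((jN - m + 1 : Nat) : Int) := by omega
      have hc2' : (m : Int) ≤ (leF a (iN - m + 1) jN : Int) := by
        rw [e1, hgetI _ _ (iN - m + 1) jN rfl hjN (by omega) (by omega)] at hc2
        simp only [Tb] at hc2; omega
      have hc1' : (m : Int) ≤ (upF a iN (jN - m + 1) : Int) := by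
        rw [e2, hgetI _ _ iN (jN - m + 1) hiN rfl (by omega) (by omega)] at hc1
        simp only [Tb] at hc1; omega
      have hfour : m ≤ upF a iN jN ∧ m ≤ leF a iN jN ∧
          m ≤ leF a (iN - m + 1) jN ∧ m ≤ upF a iN (jN - m + 1) :=
        ⟨by omega, by omega, by exact_mod_cast hc2', by exact_mod_cast hc1'⟩
      rcases (cond_iff a iN jN m hm1).mp hfour with ⟨hmi', hmj', hb⟩
      exact (scan_iff a M m hm1 (by omega)).mpr ⟨iN - m, jN - m, by omega, by omega, hb⟩
  have hA := foldl_mono_sound (PySem.List.pyRange (M : Int) 0 (-1))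
      (fun mx i => (PySem.List.pyRange (M : Int) 0 (-1)).foldl (fun mx j =>
        pvWhile dp i j (min (pvDpGet dp i j).1 (pvDpGet dp i j).2) mx) mx)
      (fun v => v ≤ (M : Int) ∧ (1 ≤ v → pvScan a M M v.toNat = true))
      (by
        intro mx x hx
        rcases (PySem.List.mem_pyRange_neg_one).mp hx with ⟨hx0, hxM⟩
        exact foldl_mono_sound (PySem.List.pyRange (M : Int) 0 (-1))
          (fun mx j => pvWhile dp x j (min (pvDpGet dp x j).1 (pvDpGet dp x j).2) mx)
          (fun v => v ≤ (M : Int) ∧ (1 ≤ v → pvScan a M M v.toNat = true))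
          (by
            intro mx' y hy
            rcases (PySem.List.mem_pyRange_neg_one).mp hy with ⟨hy0, hyM⟩
            exact hQ x y mx' hx0 hxM hy0 hyM) mx)
      0
  -- completeness side
  have hComp : ∀ m : Nat, 1 ≤ m → m ≤ M → pvScan a M M m = true → (m : Int) ≤ SA := by
    intro m hm1 hmM hscan
    rcases (scan_iff a M m hm1 hmM).mp hscan with ⟨i0, j0, hi0, hj0, hb⟩
    have hfour := (cond_iff a (i0 + m) (j0 + m) m hm1).mpr
      ⟨by omega, by omega, by
        have e1 : i0 + m - m = i0 := by omega
        have e2 : j0 + m - m = j0 := by omega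
        rw [e1, e2]; exact hb⟩
    obtain ⟨h1, h2, h3, h4⟩ := hfour
    have hmonoInner : ∀ (x : Int) (mx : Int), mx ≤ (PySem.List.pyRange (M : Int) 0 (-1)).foldl
        (fun mx j => pvWhile dp x j (min (pvDpGet dp x j).1 (pvDpGet dp x j).2) mx) mx := by
      intro x mx
      exact (foldl_mono_sound _ _ (fun _ => True)
        (fun mx' y _ => ⟨pvWhile_lower dp x y _ mx', Or.inr trivial⟩) mx).1
    rw [hSA]
    apply foldl_hit _ _ _ ((i0 + m : Nat) : Int)
      (by rw [PySem.List.mem_pyRange_neg_one]; constructor <;> omega)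
      (by
        intro mx
        apply foldl_hit _ _ _ ((j0 + m : Nat) : Int)
          (by rw [PySem.List.mem_pyRange_neg_one]; constructor <;> omega)
          (by
            intro mx'
            apply pvWhile_complete
            · rw [hgetI _ _ (i0 + m) (j0 + m) rfl rfl (by omega) (by omega)]
              simp only [Tb]
              rw [le_min_iff]
              constructor <;> omega
            · constructor
              · have e1 : ((i0 + m : Nat) : Int) - (m : Int) + 1 = ((i0 + 1 : Nat) : Int) := by omega
                rw [e1, hgetI _ _ (i0 + 1) (j0 + m) rfl rfl (by omega) (by omega)]
                simp only [Tb]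
                have e2 : i0 + m - m + 1 = i0 + 1 := by omega
                rw [e2] at h3
                omega
              · have e1 : ((j0 + m : Nat) : Int) - (m : Int) + 1 = ((j0 + 1 : Nat) : Int) := by omega
                rw [e1, hgetI _ _ (i0 + m) (j0 + 1) rfl rfl (by omega) (by omega)]
                simp only [Tb]
                have e2 : j0 + m - m + 1 = j0 + 1 := by omega
                rw [e2] at h4
                omega)
          (fun mx' y _ => pvWhile_lower dp _ y _ mx'))
      (fun mx x _ => hmonoInner x mx)
  have hA' : 0 ≤ SA ∧ (SA = 0 ∨ (SA ≤ (M : Int) ∧ (1 ≤ SA → pvScan a M M SA.toNat = true))) := by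
    rw [hSA]; exact hA
  -- B side and final comparison
  have hB1 := descend_sound a M M M
  have hB2 : ∀ m : Nat, 1 ≤ m → m ≤ M → pvScan a M M m = true → (m : Int) ≤ pvDescend a M M M :=
    fun m hm1 hmM hs => descend_complete a M M M m hm1 hmM hs
  rcases hA'.2 with h0 | ⟨hSAM, hSAscan⟩
  · rw [h0]
    rcases hB1 with h | ⟨hb1, hb2, hb3⟩
    · rw [h]
    · exfalso
      have := hComp (pvDescend a M M M).toNat (by omega) (by omega)
        (by rw [show ((pvDescend a M M M).toNat : Nat) = (pvDescend a M M M).toNat from rfl]; exact hb3)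
      omega
  · have hSA0 : 0 ≤ SA := hA'.1
    by_cases hz : SA = 0
    · rw [hz]
      rcases hB1 with h | ⟨hb1, hb2, hb3⟩
      · rw [h]
      · exfalso
        have := hComp (pvDescend a M M M).toNat (by omega) (by omega) hb3
        omega
    · have h1SA : 1 ≤ SA := by omega
      have hscanSA := hSAscan h1SA
      have hle1 : SA ≤ pvDescend a M M M :=
        le_trans (by omega) (hB2 SA.toNat (by omega) (by omega) hscanSA)
      rcases hB1 with h | ⟨hb1, hb2, hb3⟩
      · omega
      · have hle2 : pvDescend a M M M ≤ SA :=
          le_trans (by omega) (hComp (pvDescend a M M M).toNat (by omega) (by omega) hb3)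
        omega

-- ===== VERDICT (by name: the statement is the Claim_ definition above) =====
theorem largestSubsquare_spec : Claim_equal_largestSubsquare := by
  intro n a hdom hpre
  unfold Spec_largestSubsquare
  obtain ⟨hne, hcase⟩ := hpre
  have hN : 1 ≤ a.length := List.length_pos_of_ne_nil hne
  have hpg : PySem.List.pyGetD a 0 ([] : List String) = a.headD [] := by
    cases a with
    | nil => exact absurd rfl hne
    | cons x t => rw [PySem.List.pyGetD_zero_cons]; rfl
  rcases hcase with hc0 | ⟨hsq, hrowlen⟩
  · -- empty first row: every loop of both programs is empty, both return 0
    simp only [largestSubsquare, largestSubsquare_alt, hpg, hc0, Nat.cast_zero,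
      Nat.min_zero, pvDescend]
    rw [PySem.List.pyRange_neg_one_eq_nil (by omega)]
    simp only [List.foldl_nil]
    have : ∀ (l : List Int) (mx : Int), l.foldl (fun mx _ => mx) mx = mx := by
      intro l
      induction l with
      | nil => intro mx; rfl
      | cons x t ih => intro mx; rw [List.foldl_cons]; exact ih mx
    exact this _ 0
  have hc0 : (PySem.List.pyGetD a 0 ([] : List String)).length = a.length := by
    cases a with
    | nil => exact absurd rfl hne
    | cons x t => rw [PySem.List.pyGetD_zero_cons]; exact hsq.symm
  have hhead : (a.headD []).length = a.length := by
    cases a with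
    | nil => exact absurd rfl hne
    | cons x t => exact hsq.symm
  simp only [largestSubsquare, largestSubsquare_alt]
  rw [hc0, hhead, min_self]
  have hrep : (((a.length : Nat) : Int) + 1).toNat = a.length + 1 := by omega
  rw [hrep]
  exact phase2_eq a a.length hN _ (table_fold a a.length)
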